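-- pv_equiv track=rewrite | github.com/rusccom/NeuroH | projects/release-tooling/src/release_tooling/release_package/config_paths.py | slice_env_block
-- ===== SOURCE A (Python) =====
-- def slice_env_block(lines: list[str]) -> list[str] | None:
--     start = find_env_start(lines)
--     if start is None:
--         return None
--     block: list[str] = []
--     for line in lines[start + 1 :]:
--         if line and not line.startswith("  "):
--             break
--         block.append(line)
--     return block
--
-- def find_env_start(lines: list[str]) -> int | None:
--     for index, line in enumerate(lines):
--         if line.strip() == "env:":
--             return index
--     return None
-- ===== SOURCE B (Python) =====
-- def slice_env_block(lines: list[str]) -> list[str] | None: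
--     block = None
--     for line in lines:
--         if block is None:
--             if line.strip() == "env:":
--                 block = []
--         elif line and not line.startswith("  "):
--             return block
--         else:
--             block.append(line)
--     return block
-- ===== Notes on version B (the rewrite author's own statement) =====
-- stated objective: alternative
-- what changed: Replaces the two-pass find-index-then-slice-and-collect structure with a single fused scan that carries an Optional accumulator as its state and never indexes or slices.
import Mathlib
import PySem

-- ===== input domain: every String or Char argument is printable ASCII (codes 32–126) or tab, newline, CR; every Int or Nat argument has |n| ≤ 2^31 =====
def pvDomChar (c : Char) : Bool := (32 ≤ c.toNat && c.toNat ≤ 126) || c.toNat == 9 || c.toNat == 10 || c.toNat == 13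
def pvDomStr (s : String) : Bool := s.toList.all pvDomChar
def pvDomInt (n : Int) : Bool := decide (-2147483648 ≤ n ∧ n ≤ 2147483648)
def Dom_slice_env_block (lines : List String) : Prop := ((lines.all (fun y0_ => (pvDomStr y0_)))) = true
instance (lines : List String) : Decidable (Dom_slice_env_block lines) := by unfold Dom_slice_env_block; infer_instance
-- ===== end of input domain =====

-- B fuses A's find-then-slice two-pass structure into one scan carrying an Option accumulator (alternative decomposition; same cost).

-- ===== PORT A =====
-- helper find_env_start: first index whose stripped line is "env:"
def findEnvStart : List String → Option Nat
  | [] => none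
  | l :: ls => if PySem.Str.strip l = "env:" then some 0 else (findEnvStart ls).map (· + 1)

-- the for-loop over lines[start+1:] with break, accumulating block
def collectBlock : List String → List String → List String
  | [], block => block
  | l :: ls, block =>
      if l ≠ "" ∧ ¬ PySem.Str.startswith l "  " then block
      else collectBlock ls (block ++ [l])

def slice_env_block (lines : List String) : Option (List String) :=
  match findEnvStart lines with
  | none => none
  | some start => some (collectBlock (PySem.List.slice lines (some ((start : Int) + 1)) none) [])

-- ===== PORT B =====
-- single-pass state machine: state = Option block
def sebLoop : List String → Option (List String) → Option (List String)
  | [], block => block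
  | l :: ls, none =>
      if PySem.Str.strip l = "env:" then sebLoop ls (some []) else sebLoop ls none
  | l :: ls, some b =>
      if l ≠ "" ∧ ¬ PySem.Str.startswith l "  " then some b
      else sebLoop ls (some (b ++ [l]))

def slice_env_block_alt (lines : List String) : Option (List String) :=
  sebLoop lines none

-- ===== PRECONDITION & SPEC =====
def Spec_slice_env_block (lines : List String) (out : Option (List String)) : Prop := out = slice_env_block_alt lines
instance (lines : List String) (out : Option (List String)) : Decidable (Spec_slice_env_block lines out) := by unfold Spec_slice_env_block; infer_instance

-- ===== CLAIM (what is proved, stated in full; the proofs are below) =====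
def Claim_equal_slice_env_block : Prop := ∀ (lines : List String), Dom_slice_env_block lines → Spec_slice_env_block lines (slice_env_block lines)

-- ===== LEMMAS AND PROOFS =====
theorem sebLoop_some (ls : List String) : ∀ b, sebLoop ls (some b) = some (collectBlock ls b) := by
  induction ls with
  | nil => intro b; rfl
  | cons l ls ih =>
      intro b
      simp only [sebLoop, collectBlock]
      split
      · rfl
      · exact ih _

theorem main_eq (lines : List String) : slice_env_block lines = slice_env_block_alt lines := by
  induction lines with
  | nil => rfl
  | cons l ls ih =>
      by_cases h : PySem.Str.strip l = "env:"
      · simp only [slice_env_block, slice_env_block_alt, findEnvStart, sebLoop, h, if_true,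
          Nat.cast_zero, zero_add, PySem.List.slice_from_one, List.tail_cons, sebLoop_some]
      · simp only [slice_env_block, slice_env_block_alt, findEnvStart, sebLoop, h, if_false]
        cases hf : findEnvStart ls with
        | none =>
            simp only [slice_env_block, hf] at ih
            simpa [hf] using ih
        | some s =>
            simp only [Option.map_some]
            rw [show ((s + 1 : Nat) : Int) + 1 = ((s + 2 : Nat) : Int) by push_cast; ring,
              PySem.List.slice_from_natCast]
            simp only [slice_env_block, hf] at ih
            rw [show ((s : Nat) : Int) + 1 = ((s + 1 : Nat) : Int) by push_cast; ring,
              PySem.List.slice_from_natCast] at ih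
            rw [List.drop_succ_cons]
            exact ih

-- ===== VERDICT (by name: the statement is the Claim_ definition above) =====
theorem slice_env_block_spec : Claim_equal_slice_env_block := by
  intro lines _
  exact main_eq lines
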